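-- pv_equiv track=rewrite | github.com/NKlug/ring-loading | utils/utils.py | crange
-- ===== SOURCE A (Python) =====
-- def crange(start, stop, modulo):
--     """
--     Generator for circular range
--     :param start:
--     :param stop:
--     :param modulo:
--     :return:
--     """
--     # return nothing if start >= modulo
--     if start >= modulo:
--         return
--     # get stop in bounds if necessary
--     stop = stop % modulo
--     index = start
--     while index != stop:
--         yield index
--         index = (index + 1) % modulo
-- ===== SOURCE B (Python) =====
-- def crange(start, stop, modulo):
--     """
--     Circular range via a closed-form element count instead of a sentinel loop.
--     """
--     if start >= modulo:
--         return
--     stop = stop % modulo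
--     n = abs(modulo)
--     length = (stop - start) % n
--     if length == 0 and start != stop:
--         length = n
--     if length != 0:
--         yield start
--         for i in range(1, length):
--             yield (start + i) % modulo
-- ===== Notes on version B (the rewrite author's own statement) =====
-- stated objective: alternative
-- what changed: Replaces A's sentinel-comparison while-loop (step, reduce mod, compare to stop each iteration) with a closed-form circular element count length=(stop-start)%abs(modulo) (bumped to abs(modulo) on a full circle), then a fixed-count emission of start followed by (start+i)%modulo.
import Mathlib
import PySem

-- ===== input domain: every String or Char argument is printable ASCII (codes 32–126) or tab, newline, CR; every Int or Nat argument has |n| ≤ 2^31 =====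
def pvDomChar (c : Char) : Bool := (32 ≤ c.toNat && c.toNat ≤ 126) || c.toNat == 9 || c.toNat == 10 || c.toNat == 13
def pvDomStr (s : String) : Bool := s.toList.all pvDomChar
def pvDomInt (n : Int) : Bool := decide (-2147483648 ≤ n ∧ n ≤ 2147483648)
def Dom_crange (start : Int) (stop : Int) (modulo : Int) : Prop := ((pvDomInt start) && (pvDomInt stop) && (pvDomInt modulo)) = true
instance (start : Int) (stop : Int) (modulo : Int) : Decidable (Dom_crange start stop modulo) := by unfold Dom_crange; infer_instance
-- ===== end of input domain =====

-- B replaces A's sentinel-comparison while-loop by a closed-form circular element count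
-- followed by a fixed-count emission loop (objective: alternative decomposition, same cost).
-- Both are generators in Python; the ports return the list of yielded values.

-- ===== PORT A =====
-- A's `while index != stop` loop; fuel |modulo| + 1 is enough for every admitted input
-- (the loop of the Python yields at most |modulo| values), so the port is exact on Pre_.
def crangeLoop (stp : Int) (modulo : Int) : Nat → Int → List Int
  | 0, _ => []
  | fuel + 1, index =>
    if index ≠ stp then index :: crangeLoop stp modulo fuel (PySem.Int.mod (index + 1) modulo)
    else []

def crange (start : Int) (stop : Int) (modulo : Int) : List Int :=
  if start ≥ modulo then []
  else
    let stop' := PySem.Int.mod stop modulo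
    crangeLoop stop' modulo (modulo.natAbs + 1) start

-- ===== PORT B =====
def crange_alt (start : Int) (stop : Int) (modulo : Int) : List Int :=
  if start ≥ modulo then []
  else
    let stop' := PySem.Int.mod stop modulo
    let n := |modulo|
    let len0 := PySem.Int.mod (stop' - start) n
    let length := if len0 = 0 ∧ start ≠ stop' then n else len0
    if length ≠ 0 then
      start :: (PySem.List.pyRange 1 length 1).map (fun i => PySem.Int.mod (start + i) modulo)
    else []

-- ===== PRECONDITION & SPEC =====
-- Pre_ excludes exactly the inputs where the Python A raises ZeroDivisionError
-- (modulo == 0 reached by `stop % modulo`, i.e. modulo = 0 with start < modulo); B raises there too.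
def Pre_crange (start : Int) (stop : Int) (modulo : Int) : Prop := modulo ≠ 0 ∨ start ≥ modulo
instance (start : Int) (stop : Int) (modulo : Int) : Decidable (Pre_crange start stop modulo) := by unfold Pre_crange; infer_instance
def pvWitness_crange : Int × Int × Int := (0, 3, 5)

def Spec_crange (start : Int) (stop : Int) (modulo : Int) (out : List Int) : Prop := out = crange_alt start stop modulo
instance (start : Int) (stop : Int) (modulo : Int) (out : List Int) : Decidable (Spec_crange start stop modulo out) := by unfold Spec_crange; infer_instance

-- ===== CLAIM (what is proved, stated in full; the proofs are below) =====
def Claim_equal_crange : Prop := ∀ (start : Int) (stop : Int) (modulo : Int), Dom_crange start stop modulo → Pre_crange start stop modulo → Spec_crange start stop modulo (crange start stop modulo)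

-- ===== LEMMAS AND PROOFS =====

-- mod congruence: values congruent mod m have equal Python-mod.
theorem pymod_congr (m x y : Int) (h : m ∣ (x - y)) :
    PySem.Int.mod x m = PySem.Int.mod y m := by
  obtain ⟨t, ht⟩ := h
  have hx : x = y + m * t := by linarith
  subst hx
  exact Int.add_mul_fmod_self_left y m t

-- m divides x - (x % m)
theorem pymod_sub_dvd (m x : Int) : m ∣ (x - PySem.Int.mod x m) := by
  have h := PySem.Int.floordiv_mul_add_mod x m
  exact ⟨PySem.Int.floordiv x m, by linarith⟩

theorem pymod_congr_rev (m x y : Int) (h : PySem.Int.mod x m = PySem.Int.mod y m) :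
    m ∣ (x - y) := by
  have hx := pymod_sub_dvd m x
  have hy := pymod_sub_dvd m y
  have : x - y = (x - PySem.Int.mod x m) - (y - PySem.Int.mod y m) := by rw [h]; ring
  rw [this]
  exact dvd_sub hx hy

theorem pymod_idem (m x : Int) : PySem.Int.mod (PySem.Int.mod x m) m = PySem.Int.mod x m := by
  refine pymod_congr m _ x ?_
  have h := (Int.dvd_neg).mpr (pymod_sub_dvd m x)
  rwa [neg_sub] at h

-- the fuel loop from a reduced index equals the closed-form emission list
theorem crangeLoop_closed (stp m : Int) :
    ∀ (k : Nat) (fuel : Nat) (y : Int), k ≤ fuel →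
      PySem.Int.mod y m = y →
      (∀ i : Nat, i < k → PySem.Int.mod (y + i) m ≠ stp) →
      PySem.Int.mod (y + k) m = stp →
      crangeLoop stp m fuel y = (List.range k).map (fun i : Nat => PySem.Int.mod (y + (i : Int)) m) := by
  intro k
  induction k with
  | zero =>
    intro fuel y _ hy _ hk
    have hys : y = stp := by
      have : PySem.Int.mod (y + (0 : Nat)) m = PySem.Int.mod y m := by norm_num
      rw [this, hy] at hk
      exact hk
    cases fuel with
    | zero => simp [crangeLoop]
    | succ f => simp [crangeLoop, hys]
  | succ k ih =>
    intro fuel y hfuel hy h0 hk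
    obtain ⟨f, rfl⟩ : ∃ f, fuel = f + 1 := ⟨fuel - 1, by omega⟩
    have hyne : y ≠ stp := by
      have h := h0 0 (by omega)
      have : PySem.Int.mod (y + (0 : Nat)) m = y := by rw [show ((0 : Nat) : Int) = 0 by rfl, add_zero, hy]
      rw [this] at h
      exact h
    have hcongr : ∀ i : Nat, PySem.Int.mod (PySem.Int.mod (y + 1) m + i) m
        = PySem.Int.mod (y + (1 + i : Nat)) m := by
      intro i
      refine pymod_congr m _ _ ?_
      have h := (Int.dvd_neg).mpr (pymod_sub_dvd m (y + 1))
      rw [neg_sub] at h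
      have : PySem.Int.mod (y + 1) m + (i : Int) - (y + ((1 + i : Nat) : Int))
          = PySem.Int.mod (y + 1) m - (y + 1) := by push_cast; ring
      rw [this]
      exact h
    have hrec := ih f (PySem.Int.mod (y + 1) m) (by omega) (pymod_idem m (y + 1))
      (by
        intro i hi
        rw [hcongr i]
        exact h0 (1 + i) (by omega))
      (by
        rw [hcongr k]
        have : (y + ((1 + k : Nat) : Int)) = y + ((k + 1 : Nat) : Int) := by push_cast; ring
        rw [this]
        exact hk)
    have hstep : crangeLoop stp m (f + 1) y
        = y :: crangeLoop stp m f (PySem.Int.mod (y + 1) m) := by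
      simp [crangeLoop, hyne]
    rw [hstep, hrec, List.range_succ_eq_map, List.map_cons, List.map_map]
    refine congrArg₂ List.cons ?_ ?_
    · rw [show ((0 : Nat) : Int) = 0 by rfl, add_zero, hy]
    · apply List.map_congr_left
      intro i _
      simp only [Function.comp]
      rw [hcongr i]
      congr 1
      push_cast
      ring

-- the whole positive case: the fuel loop from the raw start equals B's emission list
theorem crange_pos (start stop modulo : Int)
    (L : Int) (hL1 : 1 ≤ L) (hLn : L ≤ |modulo|)
    (hK : modulo ∣ (start + L - PySem.Int.mod stop modulo))
    (hne : start ≠ PySem.Int.mod stop modulo) :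
    crangeLoop (PySem.Int.mod stop modulo) modulo (modulo.natAbs + 1) start
      = start :: (PySem.List.pyRange 1 L 1).map (fun i => PySem.Int.mod (start + i) modulo) := by
  have habs : (modulo.natAbs : Int) = |modulo| := Int.abs_eq_natAbs modulo |>.symm
  set stp := PySem.Int.mod stop modulo with hstp
  have hstpred : PySem.Int.mod stp modulo = stp := pymod_idem modulo stop
  set k := (L - 1).toNat with hkdef
  have hkL : (k : Int) = L - 1 := Int.toNat_of_nonneg (by omega)
  have hcongr : ∀ i : Nat, PySem.Int.mod (PySem.Int.mod (start + 1) modulo + i) modulo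
      = PySem.Int.mod (start + 1 + i) modulo := by
    intro i
    refine pymod_congr modulo _ _ ?_
    have h := (Int.dvd_neg).mpr (pymod_sub_dvd modulo (start + 1))
    rw [neg_sub] at h
    have : PySem.Int.mod (start + 1) modulo + (i : Int) - (start + 1 + i)
        = PySem.Int.mod (start + 1) modulo - (start + 1) := by ring
    rw [this]
    exact h
  have hnohit : ∀ i : Nat, i < k → PySem.Int.mod (PySem.Int.mod (start + 1) modulo + i) modulo ≠ stp := by
    intro i hi heq
    rw [hcongr i, ← hstpred] at heq
    have hd := pymod_congr_rev modulo _ _ heq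
    have hd2 : modulo ∣ (L - 1 - i) := by
      have := Int.dvd_sub hK hd
      have he : start + L - stp - (start + 1 + (i : Int) - stp) = L - 1 - i := by ring
      rwa [he] at this
    have hd3 : |modulo| ∣ (L - 1 - i) := (abs_dvd _ _).mpr hd2
    have hipos : (0 : Int) < L - 1 - i := by omega
    have := Int.le_of_dvd hipos hd3
    omega
  have hhit : PySem.Int.mod (PySem.Int.mod (start + 1) modulo + k) modulo = stp := by
    rw [hcongr k]
    have he : start + 1 + (k : Int) = start + L := by omega
    rw [he, ← hstpred]
    refine pymod_congr modulo _ _ ?_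
    have he2 : start + L - stp = start + L - stp := rfl
    exact hK
  have hclosed := crangeLoop_closed stp modulo k modulo.natAbs (PySem.Int.mod (start + 1) modulo)
    (by omega) (pymod_idem modulo (start + 1)) hnohit hhit
  have hstep : crangeLoop stp modulo (modulo.natAbs + 1) start
      = start :: crangeLoop stp modulo modulo.natAbs (PySem.Int.mod (start + 1) modulo) := by
    simp [crangeLoop, hne]
  rw [hstep, hclosed, PySem.List.pyRange_one 1 L, List.map_map]
  have hLk : (L - 1).toNat = k := rfl
  rw [hLk]
  refine congrArg (List.cons start) (List.map_congr_left ?_)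
  intro i _
  simp only [Function.comp]
  rw [hcongr i]
  congr 1
  ring

-- ===== VERDICT (by name: the statement is the Claim_ definition above) =====
theorem crange_spec : Claim_equal_crange := by
  intro start stop modulo _ hpre
  show crange start stop modulo = crange_alt start stop modulo
  by_cases hge : start ≥ modulo
  · simp [crange, crange_alt, hge]
  · have hm : modulo ≠ 0 := by
      rcases hpre with h | h
      · exact h
      · exact absurd h hge
    have hn : (0 : Int) < |modulo| := abs_pos.mpr hm
    simp only [crange, crange_alt, if_neg hge]
    set stp := PySem.Int.mod stop modulo with hstp
    set len0 := PySem.Int.mod (stp - start) |modulo| with hlen0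
    have h0l : 0 ≤ len0 := PySem.Int.mod_nonneg _ hn
    have h0u : len0 < |modulo| := PySem.Int.mod_lt _ hn
    by_cases hc : len0 = 0 ∧ start ≠ stp
    · -- full circle: the count is |modulo|
      have hK : modulo ∣ (start + |modulo| - stp) := by
        have hd : |modulo| ∣ (stp - start) := (PySem.Int.mod_eq_zero_iff_dvd _ _).mp hc.1
        have hd' : modulo ∣ (stp - start) := (abs_dvd _ _).mp hd
        have he : start + |modulo| - stp = |modulo| - (stp - start) := by ring
        rw [he]
        exact Int.dvd_sub ((dvd_abs _ _).mpr dvd_rfl) hd'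
      have := crange_pos start stop modulo |modulo| (by omega) le_rfl hK hc.2
      rw [if_pos hc, if_pos (show |modulo| ≠ 0 by omega), this]
    · by_cases h00 : len0 = 0
      · -- empty range: start equals the reduced stop, nothing is emitted
        have hse : start = stp := by
          by_contra hne
          exact hc ⟨h00, hne⟩
        rw [if_neg hc, if_neg (show ¬ len0 ≠ 0 by omega)]
        rw [hse]
        simp [crangeLoop]
      · -- partial arc: the count is len0
        have hne : start ≠ stp := by
          intro hse
          apply h00
          rw [hlen0, hse, sub_self]
          simp [PySem.Int.mod, Int.zero_fmod]
        have hK : modulo ∣ (start + len0 - stp) := by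
          have hd : |modulo| ∣ (stp - start - len0) := pymod_sub_dvd |modulo| (stp - start)
          have hd' : modulo ∣ (stp - start - len0) := (abs_dvd _ _).mp hd
          have he : start + len0 - stp = -(stp - start - len0) := by ring
          rw [he]
          exact (Int.dvd_neg).mpr hd'
        have := crange_pos start stop modulo len0 (by omega) (by omega) hK hne
        rw [if_neg hc, if_pos h00, this]
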